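-- pv_equiv track=rewrite | github.com/wntic/uneex_python_course | Lecture6/4_PokeMon.py | pokemon
-- ===== SOURCE A (Python) =====
-- def pokemon(players, decks) -> list[str]:
--     cards_count = {}
--
--     for player, deck_nums in players.items():
--         unique_cards = set()
--         for deck_num in deck_nums:
--             unique_cards.update(decks[deck_num])
--         cards_count[player] = len(unique_cards)
--
--     if cards_count:
--         max_pack_size = max(cards_count.values())
--     else:
--         max_pack_size = 0
--
--     top_players = [
--         player for player, count in cards_count.items() if count == max_pack_size
--     ]
--     return sorted(top_players)
-- ===== SOURCE B (Python) =====
-- def pokemon(players, decks) -> list[str]: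
--     pairs = sorted(
--         ((len({card for d in deck_nums for card in decks[d]}), player)
--          for player, deck_nums in players.items()),
--         key=lambda cp: cp[0], reverse=True)
--     top = []
--     for count, player in pairs:
--         if count != pairs[0][0]:
--             break
--         top.append(player)
--     return sorted(top)
-- ===== Notes on version B (the rewrite author's own statement) =====
-- stated objective: alternative
-- what changed: Replaces A's build-a-count-dict / max-of-values / filter-for-max passes by sort-then-scan: build (count, player) pairs, sort them by count descending, take the leading run of pairs tied at the top count, and sort those names.
import Mathlib
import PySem

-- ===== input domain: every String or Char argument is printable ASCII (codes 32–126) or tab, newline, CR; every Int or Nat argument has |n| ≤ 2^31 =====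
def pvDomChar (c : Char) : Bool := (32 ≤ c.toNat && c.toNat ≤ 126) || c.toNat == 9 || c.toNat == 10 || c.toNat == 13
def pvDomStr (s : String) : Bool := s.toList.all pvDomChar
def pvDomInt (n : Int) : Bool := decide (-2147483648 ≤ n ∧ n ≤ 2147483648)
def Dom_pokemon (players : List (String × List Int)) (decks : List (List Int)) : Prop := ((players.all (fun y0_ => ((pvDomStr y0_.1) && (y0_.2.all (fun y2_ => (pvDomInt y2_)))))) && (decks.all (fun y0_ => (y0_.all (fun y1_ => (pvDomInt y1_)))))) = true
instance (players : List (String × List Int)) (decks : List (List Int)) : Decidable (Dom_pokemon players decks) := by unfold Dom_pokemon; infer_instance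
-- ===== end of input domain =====

-- B replaces A's build-dict / max / filter passes by sort-then-scan: sort (count, player) pairs by count descending, take the leading run of equal counts, sort those names; same asymptotic cost, a different algorithm.


-- ===== PORT A =====
-- 'decks[deck_num]' is pyGetD … []: the IndexError case (out-of-range deck_num) is excluded by Pre_pokemon.
def pokemon (players : List (String × List Int)) (decks : List (List Int)) : List String :=
  let cards_count : PySem.Dict String Int :=
    players.foldl (fun cc pd =>
      cc.insert pd.1
        ((pd.2.foldl (fun s d => PySem.Set.update s (PySem.List.pyGetD decks d []))
          PySem.Set.empty).length : Int)) PySem.Dict.empty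
  let max_pack_size : Int :=
    if cards_count.items = [] then 0
    else (PySem.List.max? cards_count.values (fun v => v)).getD 0
  let top_players := (cards_count.items.filter (fun pc => pc.2 == max_pack_size)).map (fun pc => pc.1)
  PySem.List.sorted top_players (fun x => x) false

-- ===== PORT B =====
-- 'pairs[0][0]' is only read once the loop runs, i.e. when pairs ≠ [] (the match).
def pokemon_alt (players : List (String × List Int)) (decks : List (List Int)) : List String :=
  let pairs :=
    PySem.List.sorted
      (players.map (fun pd =>
        (((PySem.Set.ofList (pd.2.flatMap (fun d => PySem.List.pyGetD decks d []))).length : Int), pd.1)))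
      (fun cp => cp.1) true
  let top : List String :=
    match pairs with
    | [] => []
    | h :: t => ((h :: t).takeWhile (fun cp => cp.1 == h.1)).map (fun cp => cp.2)
  PySem.List.sorted top (fun x => x) false

-- ===== PRECONDITION & SPEC =====
-- Pre_ excludes (a) out-of-range deck numbers, on which Python A raises IndexError, and (b) association
-- lists with duplicate player names, which have no counterpart as A's dict argument 'players'.
def Pre_pokemon (players : List (String × List Int)) (decks : List (List Int)) : Prop :=
  (players.map Prod.fst).Nodup ∧
  ∀ pd ∈ players, ∀ d ∈ pd.2, PySem.Raise.InRange decks.length d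
instance (players : List (String × List Int)) (decks : List (List Int)) : Decidable (Pre_pokemon players decks) := by unfold Pre_pokemon; infer_instance
def pvWitness_pokemon : (List (String × List Int)) × List (List Int) :=
  ([("bob", [0, 1]), ("amy", [1]), ("zed", [0])], [[1, 2], [2, 3]])
def Spec_pokemon (players : List (String × List Int)) (decks : List (List Int)) (out : List String) : Prop := out = pokemon_alt players decks
instance (players : List (String × List Int)) (decks : List (List Int)) (out : List String) : Decidable (Spec_pokemon players decks out) := by unfold Spec_pokemon; infer_instance

-- ===== CLAIM (what is proved, stated in full; the proofs are below) =====
def Claim_equal_pokemon : Prop := ∀ (players : List (String × List Int)) (decks : List (List Int)), Dom_pokemon players decks → Pre_pokemon players decks → Spec_pokemon players decks (pokemon players decks)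

-- ===== LEMMAS AND PROOFS =====

-- the per-player unique-card count both programs compute
def pvCount (decks : List (List Int)) (dns : List Int) : Int :=
  (PySem.Set.ofList (dns.flatMap (fun d => PySem.List.pyGetD decks d []))).length

-- A's inner update-loop builds the same set as B's flat comprehension
lemma foldl_update_eq_update_flatten (ls : List (List Int)) (s : PySem.Set Int) :
    ls.foldl (fun s l => PySem.Set.update s l) s = PySem.Set.update s ls.flatten := by
  induction ls generalizing s with
  | nil => simp [PySem.Set.update]
  | cons l ls ih => simp [List.foldl_cons, ih, PySem.Set.update_append]

lemma countA_eq_pvCount (decks : List (List Int)) (dns : List Int) :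
    ((dns.foldl (fun s d => PySem.Set.update s (PySem.List.pyGetD decks d []))
        PySem.Set.empty).length : Int) = pvCount decks dns := by
  have h : dns.foldl (fun s d => PySem.Set.update s (PySem.List.pyGetD decks d [])) PySem.Set.empty
      = (dns.map (fun d => PySem.List.pyGetD decks d [])).foldl (fun s l => PySem.Set.update s l) PySem.Set.empty := by
    rw [List.foldl_map]
  rw [pvCount, h, foldl_update_eq_update_flatten, List.flatMap_def]
  rfl

-- A's count dict in closed form
lemma items_cards (players : List (String × List Int)) (decks : List (List Int))
    (h : (players.map Prod.fst).Nodup) :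
    (players.foldl (fun cc pd =>
      cc.insert pd.1
        ((pd.2.foldl (fun s d => PySem.Set.update s (PySem.List.pyGetD decks d []))
          PySem.Set.empty).length : Int)) PySem.Dict.empty).items
    = players.map (fun pd => (pd.1, pvCount decks pd.2)) := by
  rw [PySem.Dict.items_foldl_insert_fresh players (fun pd => pd.1)
    (fun pd => ((pd.2.foldl (fun s d => PySem.Set.update s (PySem.List.pyGetD decks d []))
          PySem.Set.empty).length : Int)) PySem.Dict.empty
    (fun a _ => by simp) h]
  rw [show PySem.Dict.empty.items = ([] : List (String × Int)) from rfl, List.nil_append]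
  exact List.map_congr_left (fun a _ => congrArg (Prod.mk a.1) (countA_eq_pvCount decks a.2))

-- on a fst-antitone list of pairs whose fsts are all ≤ c, taking while fst = c IS filtering fst = c
lemma takeWhile_antitone_eq_filter (c : Int) :
    ∀ (l : List (Int × String)), (∀ y ∈ l, y.1 ≤ c) →
      l.Pairwise (fun a b => b.1 ≤ a.1) →
      l.takeWhile (fun x => x.1 == c) = l.filter (fun x => x.1 == c) := by
  intro l
  induction l with
  | nil => intro _ _; rfl
  | cons x t ih =>
      intro hb hp
      rcases List.pairwise_cons.mp hp with ⟨hxt, hpt⟩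
      by_cases hx : x.1 = c
      · simp only [List.takeWhile_cons, List.filter_cons, hx, beq_self_eq_true, if_pos]
        rw [ih (fun y hy => hb y (List.mem_cons_of_mem _ hy)) hpt]
      · have hxc : x.1 < c := lt_of_le_of_ne (hb x (List.mem_cons_self)) hx
        have hbx : (x.1 == c) = false := beq_eq_false_iff_ne.mpr hx
        rw [List.takeWhile_cons, List.filter_cons, hbx]
        simp only [Bool.false_eq_true, if_false]
        symm
        rw [List.filter_eq_nil_iff]
        intro y hy
        have hyc : y.1 < c := lt_of_le_of_lt (hxt y hy) hxc
        simp only [beq_iff_eq]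
        omega

-- ===== VERDICT (by name: the statement is the Claim_ definition above) =====
theorem pokemon_spec : Claim_equal_pokemon := by
  intro players decks _ hpre
  unfold Spec_pokemon pokemon pokemon_alt
  dsimp only
  simp only [PySem.Dict.values]
  rw [items_cards players decks hpre.1]
  cases players with
  | nil =>
      simp only [List.map_nil, List.filter_nil]
      rw [show PySem.List.sorted ([] : List (Int × String)) (fun cp => cp.1) true = []
        from (PySem.List.sorted_eq_nil_iff _ _ _).mpr rfl]
  | cons q qs =>
      set P := q :: qs with hP
      set g : String × List Int → Int × String := fun pd => (pvCount decks pd.2, pd.1) with hg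
      have hmapg : P.map (fun pd =>
          (((PySem.Set.ofList (pd.2.flatMap (fun d => PySem.List.pyGetD decks d []))).length : Int), pd.1))
          = P.map g := by
        exact List.map_congr_left (fun pd _ => by simp [hg, pvCount])
      -- A's max_pack_size equals the running max M
      set M : Int := (qs.map (fun pd => pvCount decks pd.2)).foldl max (pvCount decks q.2) with hMdef
      have hM :
          (if (P.map (fun pd => (pd.1, pvCount decks pd.2))) = ([] : List (String × Int)) then (0 : Int)
           else (PySem.List.max? ((P.map (fun pd => (pd.1, pvCount decks pd.2))).map (fun pc => pc.2)) (fun v => v)).getD 0)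
          = M := by
        rw [if_neg (by simp [hP]), List.map_map]
        have hmap : (P.map ((fun (pc : String × Int) => pc.2) ∘ (fun pd => (pd.1, pvCount decks pd.2))))
            = pvCount decks q.2 :: qs.map (fun pd => pvCount decks pd.2) := by simp [hP]
        rw [hmap, PySem.List.max?_id_cons, Option.getD_some, List.foldl_map, hMdef, List.foldl_map]
      simp only [hM]
      -- every count is ≤ M, and M is a count
      have hle : ∀ pd ∈ P, pvCount decks pd.2 ≤ M := by
        intro pd hpd
        rcases List.mem_cons.mp hpd with h | h
        · subst h; exact (PySem.List.le_foldl_max _ _).1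
        · exact (PySem.List.le_foldl_max _ _).2 _ (List.mem_map_of_mem h)
      have hMmem : ∃ pd ∈ P, pvCount decks pd.2 = M := by
        rcases PySem.List.foldl_max_mem (qs.map (fun pd => pvCount decks pd.2)) (pvCount decks q.2) with h | h
        · exact ⟨q, List.mem_cons_self, h.symm⟩
        · rcases List.mem_map.mp h with ⟨pd, hpd, hval⟩
          exact ⟨pd, List.mem_cons_of_mem _ hpd, hval⟩
      -- B's sorted pair list
      rw [hmapg]
      rcases hrk : PySem.List.sorted (P.map g) (fun cp => cp.1) true with _ | ⟨h, t⟩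
      · exact absurd ((PySem.List.sorted_eq_nil_iff _ _ _).mp hrk) (by simp [hP])
      have hperm : (h :: t).Perm (P.map g) := hrk ▸ PySem.List.sorted_perm _ _ _
      -- the head's count is M
      have hhead : h.1 = M := by
        have hmem : h ∈ P.map g := hperm.mem_iff.mp List.mem_cons_self
        rcases List.mem_map.mp hmem with ⟨pd, hpd, hpdh⟩
        have h1 : h.1 ≤ M := by rw [← hpdh]; exact hle pd hpd
        rcases hMmem with ⟨pe, hpe, hpeM⟩
        have h2 : M ≤ h.1 := by
          rw [← hpeM]
          exact PySem.List.key_head_sorted_rev_ge _ _ hrk (g pe) (List.mem_map_of_mem hpe)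
        omega
      -- takeWhile on the sorted run is the filter of the maximum
      have htw : (h :: t).takeWhile (fun cp => cp.1 == h.1)
          = (h :: t).filter (fun cp => cp.1 == M) := by
        rw [hhead]
        refine takeWhile_antitone_eq_filter M (h :: t) ?_ ?_
        · intro y hy
          rcases List.mem_map.mp (hperm.mem_iff.mp hy) with ⟨pd, hpd, hpdy⟩
          rw [← hpdy]; exact hle pd hpd
        · exact hrk ▸ PySem.List.sorted_pairwise_rev (P.map g) (fun cp => cp.1)
      show _ = PySem.List.sorted (((h :: t).takeWhile (fun cp => cp.1 == h.1)).map (fun cp => cp.2)) (fun x => x) false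
      rw [htw]
      -- both sides are sorted(names of players whose count is M), up to a permutation
      have hAeq : ((P.map (fun pd => (pd.1, pvCount decks pd.2))).filter (fun pc => pc.2 == M)).map (fun pc => pc.1)
          = (P.filter (fun pd => pvCount decks pd.2 == M)).map (fun pd => pd.1) := by
        rw [List.filter_map, List.map_map]; rfl
      have hBeq : ((P.map g).filter (fun cp => cp.1 == M)).map (fun cp => cp.2)
          = (P.filter (fun pd => pvCount decks pd.2 == M)).map (fun pd => pd.1) := by
        rw [List.filter_map, List.map_map]; rfl
      refine PySem.List.sorted_eq_sorted_of_perm _ _ (fun x => x) (fun a b h => h) ?_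
      rw [hAeq, ← hBeq]
      exact ((hperm.filter _).map _).symm
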